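-- pv_equiv track=rewrite | github.com/tiborsimon/dotfiles | configs/ledger/scripts/formatter.py | _separate_cost_and_comments
-- ===== SOURCE A (Python) =====
-- def _separate_cost_and_comments(tokens):
--     cost = []
--     comment = []
--     for token in tokens:
--         if not comment:
--             if token.startswith(';'):
--                 comment.append(token)
--             else:
--                 cost.append(token)
--         else:
--             comment.append(token)
--     return (cost, comment)
-- ===== SOURCE B (Python) =====
-- def _separate_cost_and_comments(tokens):
--     tokens = list(tokens)
--     i = next((j for j, t in enumerate(tokens) if t.startswith(';')), len(tokens))
--     return (tokens[:i], tokens[i:])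
-- ===== Notes on version B (the rewrite author's own statement) =====
-- stated objective: simpler
-- what changed: Replaced the flag-driven accumulator loop (mutating two lists depending on whether a comment was seen) with finding the index of the first ';'-token and slicing the list there.
import Mathlib
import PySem

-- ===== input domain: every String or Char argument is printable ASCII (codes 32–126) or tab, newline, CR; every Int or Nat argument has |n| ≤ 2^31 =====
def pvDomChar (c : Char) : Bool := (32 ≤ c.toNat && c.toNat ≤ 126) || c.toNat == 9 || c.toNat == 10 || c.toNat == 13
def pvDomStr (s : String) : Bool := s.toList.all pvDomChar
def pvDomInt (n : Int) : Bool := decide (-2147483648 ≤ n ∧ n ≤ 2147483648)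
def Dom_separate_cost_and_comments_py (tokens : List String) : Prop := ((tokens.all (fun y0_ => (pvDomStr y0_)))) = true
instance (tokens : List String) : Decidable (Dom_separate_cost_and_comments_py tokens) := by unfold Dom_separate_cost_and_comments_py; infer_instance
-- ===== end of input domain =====

-- ===== PORT A =====
-- B replaces A's flag-driven accumulator loop by first-';'-index search plus slicing (simpler decomposition).
-- Loop of A: state (cost, comment); comment nonempty ⇒ everything goes to comment.
def sccLoopA : List String → List String × List String → List String × List String
  | [], st => st
  | t :: ts, (cost, comment) =>
      sccLoopA ts
        (if comment = [] then
          (if PySem.Str.startswith t ";" then (cost, comment ++ [t]) else (cost ++ [t], comment))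
        else (cost, comment ++ [t]))

def separate_cost_and_comments_py (tokens : List String) : List String × List String :=
  sccLoopA tokens ([], [])

-- ===== PORT B =====
def separate_cost_and_comments_py_alt (tokens : List String) : List String × List String :=
  let i := tokens.findIdx (fun t => PySem.Str.startswith t ";")
  (tokens.take i, tokens.drop i)

-- ===== PRECONDITION & SPEC =====
def Spec_separate_cost_and_comments_py (tokens : List String) (out : List String × List String) : Prop := out = separate_cost_and_comments_py_alt tokens
instance (tokens : List String) (out : List String × List String) : Decidable (Spec_separate_cost_and_comments_py tokens out) := by unfold Spec_separate_cost_and_comments_py; infer_instance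

-- ===== CLAIM =====
def Claim_equal_separate_cost_and_comments_py : Prop := ∀ (tokens : List String), Dom_separate_cost_and_comments_py tokens → Spec_separate_cost_and_comments_py tokens (separate_cost_and_comments_py tokens)

-- ===== LEMMAS AND PROOFS =====
theorem sccLoopA_comment_nonempty (ts : List String) (cost c : List String) (hc : c ≠ []) :
    sccLoopA ts (cost, c) = (cost, c ++ ts) := by
  induction ts generalizing c with
  | nil => simp [sccLoopA]
  | cons t ts ih =>
      simp only [sccLoopA, if_neg hc]
      rw [ih (c ++ [t]) (by simp)]
      simp

theorem sccLoopA_empty (ts : List String) (cost : List String) :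
    sccLoopA ts (cost, []) =
      (cost ++ ts.take (ts.findIdx (fun t => PySem.Str.startswith t ";")),
       ts.drop (ts.findIdx (fun t => PySem.Str.startswith t ";"))) := by
  induction ts generalizing cost with
  | nil => simp [sccLoopA]
  | cons t ts ih =>
      simp only [sccLoopA, PySem.Str.startswith_eq, List.findIdx_cons]
      rw [if_pos trivial]
      by_cases h : PySem.Chars.startswith t.toList (";".toList) = true
      · rw [if_pos h, cond_eq_if, if_pos h, List.nil_append]
        rw [sccLoopA_comment_nonempty ts cost [t] (by simp)]
        simp
      · rw [if_neg h, cond_eq_if, if_neg h]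
        rw [ih (cost ++ [t])]
        simp

-- ===== VERDICT =====
theorem separate_cost_and_comments_py_spec : Claim_equal_separate_cost_and_comments_py := by
  intro tokens _
  unfold Spec_separate_cost_and_comments_py separate_cost_and_comments_py separate_cost_and_comments_py_alt
  rw [sccLoopA_empty]
  simp
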